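-- pv_equiv track=rewrite | github.com/pascmma/cedhihorarios | app/services/session_service.py | dividir_horas_semanales
-- ===== SOURCE A (Python) =====
-- def dividir_horas_semanales(horas_semanales):
--     """
--     Divide las horas semanales en sesiones según las reglas:
--     - Si es impar y mayor a 3, asigna 3 horas a la primera sesión.
--     - El resto se divide en sesiones de 2 horas.
--     """
--     sesiones = []
--
--     if horas_semanales == 1:
--         sesiones.append(1)
--         return sesiones
--
--     if horas_semanales > 3 and horas_semanales % 2 != 0:
--         sesiones.append(3)
--         horas_semanales -= 3
--
--     while horas_semanales >= 2:
--         sesiones.append(2)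
--         horas_semanales -= 2
--
--     if horas_semanales > 0:  # Para cualquier resto menor a 2
--         sesiones.append(horas_semanales)
--
--     return sesiones
-- ===== SOURCE B (Python) =====
-- def dividir_horas_semanales(horas_semanales):
--     n = horas_semanales
--     if n <= 0:
--         return []
--     if n == 1:
--         return [1]
--     if n > 3 and n % 2 != 0:
--         return [3] + [2] * ((n - 3) // 2)
--     return [2] * (n // 2) + [1] * (n % 2)
-- ===== Notes on version B (the rewrite author's own statement) =====
-- stated objective: simpler
-- what changed: Replaces the subtract-by-2 while loop with a closed-form arithmetic construction: the list of session lengths is built directly with list multiplication from n//2 and n%2 (with the optional leading 3 for odd n>3).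
import Mathlib
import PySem

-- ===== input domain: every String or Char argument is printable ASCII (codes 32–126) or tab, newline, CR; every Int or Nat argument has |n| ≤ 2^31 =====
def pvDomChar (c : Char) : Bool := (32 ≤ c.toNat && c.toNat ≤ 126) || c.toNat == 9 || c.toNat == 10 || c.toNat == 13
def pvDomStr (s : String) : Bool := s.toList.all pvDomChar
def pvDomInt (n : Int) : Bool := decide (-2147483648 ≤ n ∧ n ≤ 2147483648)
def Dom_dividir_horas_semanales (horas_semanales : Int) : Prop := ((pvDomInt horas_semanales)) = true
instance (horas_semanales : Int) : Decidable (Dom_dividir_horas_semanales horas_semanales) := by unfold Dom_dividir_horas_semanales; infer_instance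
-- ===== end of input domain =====

-- B replaces A's subtract-by-2 while loop with a closed-form arithmetic construction (simpler).

-- ===== PORT A =====
-- the 'while horas_semanales >= 2' loop: returns (appended 2s, final remainder)
def pvLoopA (n : Int) : List Int × Int :=
  if h : n ≥ 2 then
    let p := pvLoopA (n - 2)
    (2 :: p.1, p.2)
  else ([], n)
termination_by n.toNat
decreasing_by omega

def dividir_horas_semanales (horas_semanales : Int) : List Int :=
  if horas_semanales = 1 then [1]
  else
    let (pre, h) :=
      if horas_semanales > 3 ∧ PySem.Int.mod horas_semanales 2 ≠ 0 then
        (([3] : List Int), horas_semanales - 3)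
      else ([], horas_semanales)
    let (twos, r) := pvLoopA h
    pre ++ twos ++ (if r > 0 then [r] else [])

-- ===== PORT B =====
def dividir_horas_semanales_alt (horas_semanales : Int) : List Int :=
  let n := horas_semanales
  if n ≤ 0 then []
  else if n = 1 then [1]
  else if n > 3 ∧ PySem.Int.mod n 2 ≠ 0 then
    3 :: List.replicate (PySem.Int.floordiv (n - 3) 2).toNat 2
  else
    List.replicate (PySem.Int.floordiv n 2).toNat 2
      ++ List.replicate (PySem.Int.mod n 2).toNat 1

-- ===== PRECONDITION & SPEC =====
def Spec_dividir_horas_semanales (horas_semanales : Int) (out : List Int) : Prop := out = dividir_horas_semanales_alt horas_semanales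
instance (horas_semanales : Int) (out : List Int) : Decidable (Spec_dividir_horas_semanales horas_semanales out) := by unfold Spec_dividir_horas_semanales; infer_instance

-- ===== CLAIM (what is proved, stated in full; the proofs are below) =====
def Claim_equal_dividir_horas_semanales : Prop := ∀ (horas_semanales : Int), Dom_dividir_horas_semanales horas_semanales → Spec_dividir_horas_semanales horas_semanales (dividir_horas_semanales horas_semanales)

-- ===== LEMMAS AND PROOFS =====

-- the while loop on a nonnegative input emits ⌊n/2⌋ twos and leaves remainder n % 2
theorem pvLoopA_nat (m : Nat) :
    pvLoopA (m : Int) = (List.replicate (m / 2) 2, ((m % 2 : Nat) : Int)) := by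
  induction m using Nat.strong_induction_on with
  | _ m ih =>
    by_cases h : 2 ≤ m
    · rw [pvLoopA]
      have h2 : ((m : Int)) ≥ 2 := by exact_mod_cast h
      rw [dif_pos h2]
      have e : (m : Int) - 2 = ((m - 2 : Nat) : Int) := by omega
      rw [e, ih (m - 2) (by omega)]
      have hq : m / 2 = (m - 2) / 2 + 1 := by omega
      have hr : m % 2 = (m - 2) % 2 := by omega
      rw [hq, hr, List.replicate_succ]
    · rw [pvLoopA]
      have h2 : ¬ ((m : Int) ≥ 2) := by
        intro hc; exact h (by exact_mod_cast hc)
      rw [dif_neg h2]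
      have hq : m / 2 = 0 := by omega
      have hr : m % 2 = m := by omega
      rw [hq, hr]
      simp

theorem pvLoopA_eq (n : Int) (hn : 0 ≤ n) :
    pvLoopA n = (List.replicate (n / 2).toNat 2, n % 2) := by
  obtain ⟨m, rfl⟩ : ∃ m : Nat, n = (m : Int) := ⟨n.toNat, by omega⟩
  rw [pvLoopA_nat]
  have h1 : ((m : Int) / 2).toNat = m / 2 := by omega
  have h2 : ((m : Int) % 2) = ((m % 2 : Nat) : Int) := by omega
  rw [h1, h2]

-- the while loop on an input < 2 does nothing
theorem pvLoopA_lt (n : Int) (hn : n < 2) : pvLoopA n = ([], n) := by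
  unfold pvLoopA
  simp [show ¬ n ≥ 2 by omega]

-- ===== VERDICT (by name: the statement is the Claim_ definition above) =====
theorem dividir_horas_semanales_spec : Claim_equal_dividir_horas_semanales := by
  intro n _
  show dividir_horas_semanales n = dividir_horas_semanales_alt n
  unfold dividir_horas_semanales dividir_horas_semanales_alt
  simp only [PySem.Int.mod_eq_emod_of_pos (by omega : (0:Int) < 2),
      PySem.Int.floordiv_eq_ediv_of_pos (by omega : (0:Int) < 2)]
  by_cases h1 : n = 1
  · simp [h1]
  · rw [if_neg h1]
    by_cases h0 : n ≤ 0
    · -- negative or zero input: both sides are empty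
      rw [if_pos h0, if_neg (by omega : ¬ (n > 3 ∧ n % 2 ≠ 0))]
      simp only
      rw [pvLoopA_lt n (by omega)]
      simp [show ¬ n > 0 by omega]
    · rw [if_neg h0]
      by_cases h3 : n > 3 ∧ n % 2 ≠ 0
      · -- odd n > 3: leading 3, then (n-3)/2 twos, remainder 0
        rw [if_pos h3, if_pos h3]
        simp only
        rw [pvLoopA_eq (n - 3) (by omega)]
        simp [h1, show ¬ (n - 3) % 2 > 0 by omega]
      · -- remaining positive case: half as many twos plus the odd remainder
        rw [if_neg h3, if_neg h3]
        simp only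
        rw [pvLoopA_eq n (by omega)]
        by_cases hp : n % 2 > 0
        · have h2 : n % 2 = 1 := by omega
          simp [h2, h1]
        · have h2 : n % 2 = 0 := by omega
          simp [h2, h1]
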